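-- pv_equiv track=rewrite | github.com/nick-hiebl/adventofcode | python3/utils.py | flood_fill_steps
-- ===== SOURCE A (Python) =====
-- from collections import defaultdict, deque
--
-- def flood_fill_steps(graph, start, steps):
--   from_map = {}
--   seen = set()
--   queue = deque()
--   queue.append((start, 0))
--
--   while len(queue):
--     current, so_far = queue.popleft()
--
--     if current in seen or so_far > steps:
--       continue
--
--     seen.add(current)
--
--     for neighbour,_ in graph[current]:
--       if neighbour in from_map:
--         continue
--       from_map[neighbour] = current
--       queue.append((neighbour, so_far + 1))
--
--   return seen, from_map
-- ===== SOURCE B (Python) =====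
-- def flood_fill_steps(graph, start, steps):
--   # Level-synchronous BFS: process one whole frontier per distance level.
--   seen = set()
--   from_map = {}
--   frontier = [start]
--   for _level in range(steps + 1):
--     nxt = []
--     for node in frontier:
--       if node in seen:
--         continue
--       seen.add(node)
--       for neighbour, _ in graph[node]:
--         if neighbour not in from_map:
--           from_map[neighbour] = node
--           nxt.append(neighbour)
--     frontier = nxt
--   return seen, from_map
-- ===== Notes on version B (the rewrite author's own statement) =====
-- stated objective: alternative
-- what changed: Replaces the single deque of (node, distance) pairs by a level-synchronous BFS: an outer loop over distance levels 0..steps with a per-level frontier list, so no distances are stored or compared in the queue.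
import Mathlib
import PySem

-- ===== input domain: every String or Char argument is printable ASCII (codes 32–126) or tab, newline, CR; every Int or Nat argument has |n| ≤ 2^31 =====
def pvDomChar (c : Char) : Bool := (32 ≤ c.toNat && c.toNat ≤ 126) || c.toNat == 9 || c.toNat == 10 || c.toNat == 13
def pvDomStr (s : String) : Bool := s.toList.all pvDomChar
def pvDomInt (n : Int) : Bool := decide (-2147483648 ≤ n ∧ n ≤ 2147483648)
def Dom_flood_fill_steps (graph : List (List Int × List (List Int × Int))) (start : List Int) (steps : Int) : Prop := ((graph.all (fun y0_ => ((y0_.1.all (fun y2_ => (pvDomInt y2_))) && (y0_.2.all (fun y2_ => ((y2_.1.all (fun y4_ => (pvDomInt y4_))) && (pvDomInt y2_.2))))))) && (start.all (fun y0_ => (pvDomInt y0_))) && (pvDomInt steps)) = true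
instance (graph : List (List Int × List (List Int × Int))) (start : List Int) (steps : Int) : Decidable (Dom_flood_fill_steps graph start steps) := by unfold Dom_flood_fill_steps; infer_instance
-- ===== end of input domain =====

-- B replaces A's distance-tagged deque by a level-synchronous BFS (outer loop over
-- levels, per-level frontier lists); same return value, objective: alternative.

-- ===== PORT A =====
-- inner for-loop of A: scan the adjacency list, record first-writer from_map
-- entries and append newly discovered nodes to the queue at level `lvl`
def fsScan (cur : List Int) (lvl : Int) :
    List (List Int × Int) → PySem.Dict (List Int) (List Int) → List (List Int × Int) →
    PySem.Dict (List Int) (List Int) × List (List Int × Int)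
  | [], fm, q => (fm, q)
  | (n, _) :: rest, fm, q =>
    if fm.contains n then fsScan cur lvl rest fm q
    else fsScan cur lvl rest (fm.insert n cur) (q ++ [(n, lvl)])

-- all neighbour nodes listed anywhere in the graph (first occurrences); only used
-- as the termination measure of fsLoop
def fsAllN (graph : List (List Int × List (List Int × Int))) : List (List Int) :=
  PySem.List.dedup (graph.flatMap (fun p => p.2.map Prod.fst))

-- termination-measure lemmas, cited by fsLoop's decreasing_by
theorem fsMissing_insert (m : List (List Int)) (hm : m.Nodup)
    (fm : PySem.Dict (List Int) (List Int)) (n v : List Int)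
    (hn : n ∈ m) (hc : fm.contains n = false) :
    ((m.filter (fun x => !((fm.insert n v).contains x))).length) + 1
      = (m.filter (fun x => !(fm.contains x))).length := by
  induction m with
  | nil => cases hn
  | cons a t ih =>
    rcases List.nodup_cons.mp hm with ⟨ha, ht⟩
    by_cases han : a = n
    · subst han
      have h1 : (fm.insert a v).contains a = true := PySem.Dict.contains_insert_self _ _ _
      have h2 : ∀ x ∈ t, (!((fm.insert a v).contains x)) = (!(fm.contains x)) := by
        intro x hx
        have hxn : x ≠ a := fun h => ha (h ▸ hx)
        rw [PySem.Dict.contains_insert]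
        simp [beq_eq_false_iff_ne.mpr hxn]
      simp [h1, hc, List.filter_congr h2]
    · have hn' : n ∈ t := by
        rcases List.mem_cons.mp hn with h | h
        · exact absurd h.symm han
        · exact h
      have h3 : ((fm.insert n v).contains a) = (fm.contains a) := by
        rw [PySem.Dict.contains_insert]
        simp [beq_eq_false_iff_ne.mpr han]
      by_cases hca : fm.contains a = true <;>
        simp [hca, h3, ih ht hn']

theorem fsScan_measure (cur : List Int) (lvl : Int) (m : List (List Int)) (hm : m.Nodup) :
    ∀ (adj : List (List Int × Int)) (fm : PySem.Dict (List Int) (List Int))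
      (q : List (List Int × Int)),
      (∀ p ∈ adj, p.1 ∈ m) →
      (fsScan cur lvl adj fm q).2.length
          + (m.filter (fun x => !((fsScan cur lvl adj fm q).1.contains x))).length
        ≤ q.length + (m.filter (fun x => !(fm.contains x))).length := by
  intro adj
  induction adj with
  | nil => intro fm q _; simp [fsScan]
  | cons p rest ih =>
    intro fm q hmem
    obtain ⟨n, w⟩ := p
    have hn : n ∈ m := hmem (n, w) (List.mem_cons_self ..)
    by_cases hc : fm.contains n = true
    · simpa [fsScan, hc] using ih fm q (fun p hp => hmem p (List.mem_cons_of_mem _ hp))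
    · have hc' : fm.contains n = false := by simp at hc; exact hc
      have := ih (fm.insert n cur) (q ++ [(n, lvl)])
        (fun p hp => hmem p (List.mem_cons_of_mem _ hp))
      have hmiss := fsMissing_insert m hm fm n cur hn hc'
      simp only [fsScan, hc', if_false, Bool.false_eq_true] at *
      simp only [List.length_append, List.length_cons, List.length_nil] at this ⊢
      omega

theorem fsGetMk_mem {graph : List (List Int × List (List Int × Int))}
    {c : List Int} {adj : List (List Int × Int)}
    (h : (PySem.Dict.mk graph).get? c = some adj) : (c, adj) ∈ graph := by
  exact PySem.Dict.mem_items_of_get?_eq_some _ h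

-- A's while-loop over the deque of (node, so_far) pairs
def fsLoop (graph : List (List Int × List (List Int × Int))) (steps : Int) :
    List (List Int × Int) → List (List Int) → PySem.Dict (List Int) (List Int) →
    List (List Int) × PySem.Dict (List Int) (List Int)
  | [], seen, fm => (seen, fm)
  | (cur, sofar) :: q, seen, fm =>
    if PySem.Set.contains seen cur || decide (sofar > steps) then
      fsLoop graph steps q seen fm
    else
      match h : (PySem.Dict.mk graph).get? cur with
      | none => (seen, fm)   -- Python raises KeyError here; excluded by Pre_
      | some adj =>
        let r := fsScan cur (sofar + 1) adj fm q
        fsLoop graph steps r.2 (PySem.Set.add seen cur) r.1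
termination_by q _ fm => q.length + ((fsAllN graph).filter (fun x => !(fm.contains x))).length
decreasing_by
  · simp only [List.length_cons]; omega
  · have hadj : ∀ p ∈ adj, p.1 ∈ fsAllN graph := by
      intro p hp
      have hg : (cur, adj) ∈ graph := fsGetMk_mem h
      have : p.1 ∈ graph.flatMap (fun q => q.2.map Prod.fst) :=
        List.mem_flatMap.mpr ⟨(cur, adj), hg, List.mem_map.mpr ⟨p, hp, rfl⟩⟩
      simpa [fsAllN, PySem.List.mem_dedup] using this
    have := fsScan_measure cur (sofar + 1) (fsAllN graph)
      (by simpa [fsAllN] using PySem.List.nodup_dedup (graph.flatMap (fun p => p.2.map Prod.fst)))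
      adj fm q hadj
    simp only [List.length_cons]
    omega

def flood_fill_steps (graph : List (List Int × List (List Int × Int))) (start : List Int) (steps : Int) : List (List Int) × (List (List Int × List Int)) :=
  let r := fsLoop graph steps [(start, 0)] PySem.Set.empty PySem.Dict.empty
  (r.1, r.2.items)

-- ===== PORT B =====
-- neighbour scan of one frontier node: first-writer from_map entries, new nodes
-- collected (untagged) into the next frontier
def fsScanB (cur : List Int) :
    List (List Int × Int) → PySem.Dict (List Int) (List Int) → List (List Int) →
    PySem.Dict (List Int) (List Int) × List (List Int)
  | [], fm, nxt => (fm, nxt)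
  | (n, _) :: rest, fm, nxt =>
    if fm.contains n then fsScanB cur rest fm nxt
    else fsScanB cur rest (fm.insert n cur) (nxt ++ [n])

-- one level of B: process every frontier node, building the next frontier
def fsLevel (graph : List (List Int × List (List Int × Int))) :
    List (List Int) → List (List Int) → PySem.Dict (List Int) (List Int) → List (List Int) →
    List (List Int) × PySem.Dict (List Int) (List Int) × List (List Int)
  | [], seen, fm, nxt => (seen, fm, nxt)
  | c :: cs, seen, fm, nxt =>
    if PySem.Set.contains seen c then fsLevel graph cs seen fm nxt
    else
      match (PySem.Dict.mk graph).get? c with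
      | none => (seen, fm, nxt)   -- Python raises KeyError here; excluded by Pre_
      | some adj =>
        let r := fsScanB c adj fm nxt
        fsLevel graph cs (PySem.Set.add seen c) r.1 r.2

-- B's outer loop: `k` remaining levels
def fsOuter (graph : List (List Int × List (List Int × Int))) :
    Nat → List (List Int) → List (List Int) → PySem.Dict (List Int) (List Int) →
    List (List Int) × PySem.Dict (List Int) (List Int)
  | 0, _, seen, fm => (seen, fm)
  | k + 1, fr, seen, fm =>
    let r := fsLevel graph fr seen fm []
    fsOuter graph k r.2.2 r.1 r.2.1

def flood_fill_steps_alt (graph : List (List Int × List (List Int × Int))) (start : List Int) (steps : Int) : List (List Int) × (List (List Int × List Int)) :=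
  let r := fsOuter graph (steps + 1).toNat [start] PySem.Set.empty PySem.Dict.empty
  (r.1, r.2.items)

-- ===== PRECONDITION & SPEC =====
-- Pre_ excludes the inputs on which Python A raises KeyError: when steps ≥ 0 it
-- requires the start node and every neighbour listed in the graph to be graph keys
-- (a closed sufficient condition for every lookup the traversal performs to succeed).
def Pre_flood_fill_steps (graph : List (List Int × List (List Int × Int))) (start : List Int) (steps : Int) : Prop :=
  steps < 0 ∨ (start ∈ graph.map Prod.fst ∧ ∀ p ∈ graph, ∀ e ∈ p.2, e.1 ∈ graph.map Prod.fst)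
instance (graph : List (List Int × List (List Int × Int))) (start : List Int) (steps : Int) : Decidable (Pre_flood_fill_steps graph start steps) := by unfold Pre_flood_fill_steps; infer_instance

def pvWitness_flood_fill_steps : (List (List Int × List (List Int × Int))) × List Int × Int :=
  ([([0], [([1], 7)]), ([1], [([0], 2)])], [0], 1)

def Spec_flood_fill_steps (graph : List (List Int × List (List Int × Int))) (start : List Int) (steps : Int) (out : List (List Int) × (List (List Int × List Int))) : Prop := out = flood_fill_steps_alt graph start steps
instance (graph : List (List Int × List (List Int × Int))) (start : List Int) (steps : Int) (out : List (List Int) × (List (List Int × List Int))) : Decidable (Spec_flood_fill_steps graph start steps out) := by unfold Spec_flood_fill_steps; infer_instance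

-- ===== CLAIM (what is proved, stated in full; the proofs are below) =====
def Claim_equal_flood_fill_steps : Prop := ∀ (graph : List (List Int × List (List Int × Int))) (start : List Int) (steps : Int), Dom_flood_fill_steps graph start steps → Pre_flood_fill_steps graph start steps → Spec_flood_fill_steps graph start steps (flood_fill_steps graph start steps)

-- ===== LEMMAS AND PROOFS =====

-- A's inner scan is B's inner scan with the new nodes tagged with the level
theorem fsScan_rel (cur : List Int) (lvl : Int) :
    ∀ (adj : List (List Int × Int)) (fm : PySem.Dict (List Int) (List Int))
      (q : List (List Int × Int)) (nxt : List (List Int)),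
      fsScan cur lvl adj fm (q ++ nxt.map (fun n => (n, lvl)))
        = ((fsScanB cur adj fm nxt).1,
           q ++ (fsScanB cur adj fm nxt).2.map (fun n => (n, lvl))) := by
  intro adj
  induction adj with
  | nil => intro fm q nxt; simp [fsScan, fsScanB]
  | cons p rest ih =>
    intro fm q nxt
    obtain ⟨n, w⟩ := p
    by_cases hc : fm.contains n = true
    · simp [fsScan, fsScanB, hc, ih]
    · have hc' : fm.contains n = false := by simpa using hc
      have happ : q ++ nxt.map (fun n => (n, lvl)) ++ [(n, lvl)]
          = q ++ (nxt ++ [n]).map (fun n => (n, lvl)) := by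
        simp
      simp only [fsScan, fsScanB, hc', Bool.false_eq_true, if_false, happ]
      exact ih (fm.insert n cur) q (nxt ++ [n])

theorem fsScanB_mem (cur : List Int) :
    ∀ (adj : List (List Int × Int)) (fm : PySem.Dict (List Int) (List Int))
      (nxt : List (List Int)) (n : List Int),
      n ∈ (fsScanB cur adj fm nxt).2 → n ∈ nxt ∨ n ∈ adj.map Prod.fst := by
  intro adj
  induction adj with
  | nil => intro fm nxt n h; simp [fsScanB] at h; exact Or.inl h
  | cons p rest ih =>
    intro fm nxt n h
    obtain ⟨m, w⟩ := p
    by_cases hc : fm.contains m = true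
    · simp only [fsScanB, hc, if_true] at h
      rcases ih fm nxt n h with h' | h'
      · exact Or.inl h'
      · exact Or.inr (by simpa using Or.inr h')
    · have hc' : fm.contains m = false := by simpa using hc
      simp only [fsScanB, hc', Bool.false_eq_true, if_false] at h
      rcases ih (fm.insert m cur) (nxt ++ [m]) n h with h' | h'
      · rcases List.mem_append.mp h' with h'' | h''
        · exact Or.inl h''
        · exact Or.inr (by simp at h''; simp [h''])
      · exact Or.inr (by simpa using Or.inr h')

-- a queue whose entries all lie beyond `steps` drains without touching the state
theorem fsDrain (graph : List (List Int × List (List Int × Int))) (steps : Int) :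
    ∀ (q : List (List Int × Int)) (seen : List (List Int))
      (fm : PySem.Dict (List Int) (List Int)),
      (∀ e ∈ q, steps < e.2) → fsLoop graph steps q seen fm = (seen, fm) := by
  intro q
  induction q with
  | nil => intro seen fm _; simp [fsLoop]
  | cons e q ih =>
    intro seen fm h
    obtain ⟨c, d⟩ := e
    have hd : steps < d := h (c, d) (List.mem_cons_self ..)
    rw [fsLoop]
    simp only [show d > steps from hd, decide_true, Bool.or_true, if_true]
    exact ih seen fm (fun e he => h e (List.mem_cons_of_mem _ he))

theorem fsKey_isSome {graph : List (List Int × List (List Int × Int))} {c : List Int}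
    (h : c ∈ graph.map Prod.fst) : ∃ adj, (PySem.Dict.mk graph).get? c = some adj := by
  induction graph with
  | nil => simp at h
  | cons p rest ih =>
    obtain ⟨a, b⟩ := p
    rw [PySem.Dict.get?_mk_cons]
    by_cases he : a = c
    · exact ⟨b, by simp [he]⟩
    · have hc : c ∈ rest.map Prod.fst := by
        rcases List.mem_map.mp h with ⟨q, hq, rfl⟩
        rcases List.mem_cons.mp hq with rfl | hq'
        · simp at he
        · exact List.mem_map.mpr ⟨q, hq', rfl⟩
      rcases ih hc with ⟨adj, hadj⟩
      exact ⟨adj, by simp [he, hadj]⟩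

-- the main correspondence: A's queue at the boundary between level (steps - k) and
-- the next level equals B's current fsLevel run followed by k more outer levels
theorem fsMain (graph : List (List Int × List (List Int × Int))) (steps : Int)
    (hcl : ∀ p ∈ graph, ∀ e ∈ p.2, e.1 ∈ graph.map Prod.fst) :
    ∀ (k : Nat) (xs ys seen : List (List Int)) (fm : PySem.Dict (List Int) (List Int)),
      (∀ c ∈ xs, c ∈ graph.map Prod.fst) → (∀ c ∈ ys, c ∈ graph.map Prod.fst) →
      (k : Int) ≤ steps →
      fsLoop graph steps
          (xs.map (fun n => (n, steps - k)) ++ ys.map (fun n => (n, steps - k + 1)))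
          seen fm
        = fsOuter graph k (fsLevel graph xs seen fm ys).2.2
            (fsLevel graph xs seen fm ys).1 (fsLevel graph xs seen fm ys).2.1 := by
  intro k
  induction k with
  | zero =>
    intro xs
    induction xs with
    | nil =>
      intro ys seen fm _ _ _
      simp only [List.map_nil, List.nil_append, fsLevel, fsOuter]
      exact fsDrain graph steps _ seen fm
        (by intro e he; rcases List.mem_map.mp he with ⟨n, _, rfl⟩; simp)
    | cons c cs ih =>
      intro ys seen fm hx hy hk
      have hd : ¬ ((steps - ((0 : Nat) : Int)) > steps) := by push_cast; omega
      by_cases hs : PySem.Set.contains seen c = true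
      · have hmem : c ∈ seen := by simpa using hs
        rw [List.map_cons, List.cons_append, fsLoop, if_pos (by simp; exact hmem)]
        conv_rhs => rw [fsLevel, if_pos hs]
        exact ih ys seen fm (fun c hc => hx c (List.mem_cons_of_mem _ hc)) hy hk
      · have hnmem : c ∉ seen := by simpa using hs
        rcases fsKey_isSome (hx c (List.mem_cons_self ..)) with ⟨adj, hadj⟩
        have hadjmem : ∀ p ∈ adj, p.1 ∈ graph.map Prod.fst := by
          intro p hp; exact hcl (c, adj) (fsGetMk_mem hadj) p hp
        rw [List.map_cons, List.cons_append, fsLoop,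
          if_neg (by simp; exact hnmem)]
        conv_rhs => rw [fsLevel, if_neg hs, hadj]
        split
        · rename_i hnone; rw [hadj] at hnone; cases hnone
        · rename_i adj' hsome
          rw [hadj] at hsome; injection hsome with he; subst he
          rw [fsScan_rel c (steps - ((0:Nat):Int) + 1) adj fm
            (cs.map (fun n => (n, steps - ((0:Nat):Int)))) ys]
          exact ih (fsScanB c adj fm ys).2 (PySem.Set.add seen c) (fsScanB c adj fm ys).1
            (fun c hc => hx c (List.mem_cons_of_mem _ hc))
            (fun n hn => by
              rcases fsScanB_mem c adj fm ys n hn with h' | h'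
              · exact hy n h'
              · rcases List.mem_map.mp h' with ⟨p, hp, rfl⟩; exact hadjmem p hp)
            hk
  | succ k ihk =>
    intro xs
    induction xs with
    | nil =>
      intro ys seen fm _ hy hk
      simp only [List.map_nil, List.nil_append, fsLevel]
      have harith : steps - ((k + 1 : Nat) : Int) + 1 = steps - (k : Nat) := by push_cast; ring
      have hk' : ((k : Nat) : Int) ≤ steps := by push_cast at hk ⊢; omega
      have hrec := ihk ys [] seen fm hy (by simp) hk'
      simp only [List.map_nil, List.append_nil] at hrec
      rw [harith, hrec]
      rfl
    | cons c cs ih =>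
      intro ys seen fm hx hy hk
      have hd : ¬ ((steps - ((k + 1 : Nat) : Int)) > steps) := by push_cast; push_cast at hk; omega
      by_cases hs : PySem.Set.contains seen c = true
      · have hmem : c ∈ seen := by simpa using hs
        rw [List.map_cons, List.cons_append, fsLoop, if_pos (by simp; exact Or.inl hmem)]
        conv_rhs => rw [fsLevel, if_pos hs]
        exact ih ys seen fm (fun c hc => hx c (List.mem_cons_of_mem _ hc)) hy hk
      · have hnmem : c ∉ seen := by simpa using hs
        rcases fsKey_isSome (hx c (List.mem_cons_self ..)) with ⟨adj, hadj⟩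
        have hadjmem : ∀ p ∈ adj, p.1 ∈ graph.map Prod.fst := by
          intro p hp; exact hcl (c, adj) (fsGetMk_mem hadj) p hp
        rw [List.map_cons, List.cons_append, fsLoop,
          if_neg (by simp; exact ⟨hnmem, by omega⟩)]
        conv_rhs => rw [fsLevel, if_neg hs, hadj]
        split
        · rename_i hnone; rw [hadj] at hnone; cases hnone
        · rename_i adj' hsome
          rw [hadj] at hsome; injection hsome with he; subst he
          rw [fsScan_rel c (steps - ((k + 1 : Nat) : Int) + 1) adj fm
            (cs.map (fun n => (n, steps - ((k + 1 : Nat) : Int)))) ys]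
          exact ih (fsScanB c adj fm ys).2 (PySem.Set.add seen c) (fsScanB c adj fm ys).1
            (fun c hc => hx c (List.mem_cons_of_mem _ hc))
            (fun n hn => by
              rcases fsScanB_mem c adj fm ys n hn with h' | h'
              · exact hy n h'
              · rcases List.mem_map.mp h' with ⟨p, hp, rfl⟩; exact hadjmem p hp)
            hk

-- ===== VERDICT (by name: the statement is the Claim_ definition above) =====
theorem flood_fill_steps_spec : Claim_equal_flood_fill_steps := by
  intro graph start steps _ hpre
  unfold Spec_flood_fill_steps
  by_cases hneg : steps < 0
  · have h0 : (steps + 1).toNat = 0 := by omega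
    have hskip : (0 : Int) > steps := by omega
    unfold flood_fill_steps flood_fill_steps_alt
    rw [fsLoop]
    simp [hskip, fsLoop, h0, fsOuter]
  · rcases hpre with h | ⟨hstart, hcl⟩
    · exact absurd h hneg
    · have hk : ((steps.toNat : Nat) : Int) ≤ steps := by omega
      have hmain := fsMain graph steps hcl steps.toNat [start] [] PySem.Set.empty
        PySem.Dict.empty (by intro c hc; simp at hc; subst hc; exact hstart) (by simp) hk
      have harith : steps - ((steps.toNat : Nat) : Int) = 0 := by omega
      have h1 : (steps + 1).toNat = steps.toNat + 1 := by omega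
      unfold flood_fill_steps flood_fill_steps_alt
      rw [harith] at hmain
      simp only [List.map_cons, List.map_nil, List.append_nil] at hmain
      rw [hmain, h1]
      rfl
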